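-- pv_equiv track=rewrite | github.com/V4L321N/Zeitreihenanalyse_1 | zeitreihenanalyse_ver_01.py | timeblocks
-- ===== SOURCE A (Python) =====
-- def timeblocks(item):
--     init_list = []
--     blocked_df = []
--     for i in range(len(item)-1):
--         if item[i+1] - item[i] == 1:
--             init_list.append(i)
--         else:
--             init_list.append(i)
--             blocked_df.append(init_list)
--             init_list = []
--     return blocked_df
-- ===== SOURCE B (Python) =====
-- def timeblocks(item):
--     # two-pass: collect breakpoints first, then slice ranges between them
--     breakpoints = [i for i in range(len(item) - 1) if item[i + 1] - item[i] != 1]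
--     blocked = []
--     start = 0
--     for b in breakpoints:
--         blocked.append(list(range(start, b + 1)))
--         start = b + 1
--     return blocked
-- ===== Notes on version B (the rewrite author's own statement) =====
-- stated objective: alternative
-- what changed: B replaces A's single stateful pass that accumulates the current run list with a two-pass scheme: first collect the breakpoint indices, then emit each block as a range between successive breakpoints (trailing run intentionally not emitted, matching A).
import Mathlib
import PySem

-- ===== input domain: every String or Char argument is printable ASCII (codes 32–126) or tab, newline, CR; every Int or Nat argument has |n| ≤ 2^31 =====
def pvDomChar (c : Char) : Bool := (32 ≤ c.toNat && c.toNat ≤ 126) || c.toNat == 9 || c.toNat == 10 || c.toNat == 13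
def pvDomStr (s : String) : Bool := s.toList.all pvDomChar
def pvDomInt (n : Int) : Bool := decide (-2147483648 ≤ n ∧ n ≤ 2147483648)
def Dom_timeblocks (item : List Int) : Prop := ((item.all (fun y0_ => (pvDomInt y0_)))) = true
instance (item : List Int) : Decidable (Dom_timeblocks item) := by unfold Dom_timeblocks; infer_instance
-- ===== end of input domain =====

-- B builds the blocks from a precomputed breakpoints list in a second pass instead of A's single stateful run accumulator; same behaviour, same cost.

-- ===== PORT A =====
def timeblocks (item : List Int) : List (List Int) :=
  ((List.range (item.length - 1)).foldl
    (fun (st : List Int × List (List Int)) i =>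
      if item.getD (i + 1) 0 - item.getD i 0 == 1 then
        (st.1 ++ [(i : Int)], st.2)
      else
        ([], st.2 ++ [st.1 ++ [(i : Int)]]))
    ([], [])).2

-- ===== PORT B =====
def timeblocks_alt (item : List Int) : List (List Int) :=
  let breakpoints := (List.range (item.length - 1)).filter
      (fun i => !(item.getD (i + 1) 0 - item.getD i 0 == 1))
  (breakpoints.foldl
    (fun (st : Nat × List (List Int)) b =>
      (b + 1, st.2 ++ [(List.range' st.1 (b + 1 - st.1)).map Int.ofNat]))
    (0, [])).2

-- ===== PRECONDITION & SPEC =====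
def Spec_timeblocks (item : List Int) (out : List (List Int)) : Prop := out = timeblocks_alt item
instance (item : List Int) (out : List (List Int)) : Decidable (Spec_timeblocks item out) := by unfold Spec_timeblocks; infer_instance

-- ===== CLAIM (what is proved, stated in full; the proofs are below) =====
def Claim_equal_timeblocks : Prop := ∀ (item : List Int), Dom_timeblocks item → Spec_timeblocks item (timeblocks item)

-- ===== LEMMAS AND PROOFS =====

/-- A's loop step, with the consecutiveness test abstracted as `p`. -/
def pvStepA (p : Nat → Bool) (st : List Int × List (List Int)) (i : Nat) :
    List Int × List (List Int) :=
  if p i then (st.1 ++ [(i : Int)], st.2)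
  else ([], st.2 ++ [st.1 ++ [(i : Int)]])

/-- B's loop step. -/
def pvStepB (st : Nat × List (List Int)) (b : Nat) : Nat × List (List Int) :=
  (b + 1, st.2 ++ [(List.range' st.1 (b + 1 - st.1)).map Int.ofNat])

/-- B's fold accumulates its output on the right of the initial accumulator. -/
theorem pvFoldB_acc (L : List Nat) (s : Nat) (o : List (List Int)) :
    L.foldl pvStepB (s, o)
      = ((L.foldl pvStepB (s, [])).1, o ++ (L.foldl pvStepB (s, [])).2) := by
  induction L generalizing s o with
  | nil => simp
  | cons b L ih =>
    simp only [List.foldl_cons, pvStepB, List.nil_append]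
    rw [ih (b + 1) (o ++ [(List.range' s (b + 1 - s)).map Int.ofNat]),
        ih (b + 1) ([(List.range' s (b + 1 - s)).map Int.ofNat])]
    simp

/-- Core invariant: running A's loop over `range' a k` with current run `[s..a)`
    equals the already-flushed blocks plus B's blocks over the breakpoints in
    `range' a k`, started at `s`. -/
theorem pvMain (p : Nat → Bool) (k : Nat) :
    ∀ (a s : Nat) (acc : List (List Int)), s ≤ a →
    ((List.range' a k).foldl (pvStepA p) ((List.range' s (a - s)).map Int.ofNat, acc)).2
      = acc ++ (((List.range' a k).filter (fun i => !(p i))).foldl pvStepB (s, [])).2 := by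
  induction k with
  | zero => intro a s acc _; simp
  | succ k ih =>
    intro a s acc hsa
    have hcat : (List.range' s (a - s)).map Int.ofNat ++ [(a : Int)]
        = (List.range' s (a + 1 - s)).map Int.ofNat := by
      have h1 : a + 1 - s = (a - s) + 1 := by omega
      have h2 : s + (a - s) = a := by omega
      rw [h1, List.range'_concat]
      simp [h2]
    rw [List.range'_succ, List.foldl_cons, List.filter_cons]
    cases hp : p a with
    | true =>
      simp only [pvStepA, hp, Bool.not_true, if_true, Bool.false_eq_true, if_false]
      rw [hcat]
      exact ih (a + 1) s acc (by omega)
    | false =>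
      simp only [pvStepA, hp, Bool.not_false, Bool.false_eq_true, if_false, if_true]
      rw [hcat, List.foldl_cons]
      have hnil : ((List.range' (a + 1) ((a + 1) - (a + 1))).map Int.ofNat : List Int) = [] := by
        simp
      rw [show ([] : List Int) = (List.range' (a + 1) ((a + 1) - (a + 1))).map Int.ofNat from hnil.symm]
      rw [ih (a + 1) (a + 1) (acc ++ [(List.range' s (a + 1 - s)).map Int.ofNat]) (le_refl _)]
      simp only [pvStepB]
      rw [pvFoldB_acc _ (a + 1) ([] ++ [(List.range' s (a + 1 - s)).map Int.ofNat])]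
      simp

-- ===== VERDICT (by name: the statement is the Claim_ definition above) =====
theorem timeblocks_spec : Claim_equal_timeblocks := by
  intro item _
  unfold Spec_timeblocks timeblocks timeblocks_alt
  have hA : (fun (st : List Int × List (List Int)) i =>
      if item.getD (i + 1) 0 - item.getD i 0 == 1 then
        (st.1 ++ [(i : Int)], st.2)
      else
        ([], st.2 ++ [st.1 ++ [(i : Int)]]))
      = pvStepA (fun i => item.getD (i + 1) 0 - item.getD i 0 == 1) := by
    funext st i; simp [pvStepA]
  have hB : (fun (st : Nat × List (List Int)) b =>
      (b + 1, st.2 ++ [(List.range' st.1 (b + 1 - st.1)).map Int.ofNat])) = pvStepB := by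
    funext st b; simp [pvStepB]
  rw [hA, hB, List.range_eq_range']
  have := pvMain (fun i => item.getD (i + 1) 0 - item.getD i 0 == 1)
      (item.length - 1) 0 0 [] (le_refl 0)
  simpa using this
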